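-- pv_equiv track=rewrite | github.com/shiquanyang/unilm | s2s-ft/multimodalKB/utils/mturk_log_parser.py | check_reptitive_conversation
-- ===== SOURCE A (Python) =====
-- def check_reptitive_conversation(data):
--     questions = {}
--     turn_cnt = 0
--     for element in data:
--         turn_cnt += 1
--         if turn_cnt % 2 == 1:
--             if element not in questions:
--                 questions[element] = 1
--             else:
--                 questions[element] += 1
--     for key in questions:
--         if questions[key] > 1:
--             return True
--     return False
-- ===== SOURCE B (Python) =====
-- def check_reptitive_conversation(data):
--     odds = sorted(x for i, x in enumerate(data) if i % 2 == 0)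
--     return any(a == b for a, b in zip(odds, odds[1:]))
-- ===== Notes on version B (the rewrite author's own statement) =====
-- stated objective: alternative
-- what changed: B detects a repeated odd-turn question by sorting the odd-turn elements and scanning adjacent pairs for equality (sort-and-scan duplicate detection), replacing A's hash-based frequency dict built in one loop and scanned for counts > 1 in a second loop; B uses no hashing or counting at all.
import Mathlib
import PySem

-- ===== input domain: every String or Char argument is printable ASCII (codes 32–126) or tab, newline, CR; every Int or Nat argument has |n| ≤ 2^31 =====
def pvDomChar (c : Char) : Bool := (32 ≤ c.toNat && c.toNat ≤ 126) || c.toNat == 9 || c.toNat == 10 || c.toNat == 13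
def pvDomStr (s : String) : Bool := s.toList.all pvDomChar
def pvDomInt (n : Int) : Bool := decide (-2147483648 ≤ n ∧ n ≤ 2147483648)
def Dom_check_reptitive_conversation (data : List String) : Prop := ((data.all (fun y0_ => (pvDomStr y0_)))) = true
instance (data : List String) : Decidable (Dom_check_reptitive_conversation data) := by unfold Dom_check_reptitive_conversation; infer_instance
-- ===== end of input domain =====

-- B sorts the odd-turn elements and scans adjacent pairs for equality (sort-and-scan, no
-- hashing/counting), replacing A's frequency dict built in one loop and scanned in a second.

-- ===== PORT A =====
-- A's loop body: increment turn counter, and on odd turns count the element in a dict.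
def aStep (s : PySem.Dict String Int × Int) (element : String) : PySem.Dict String Int × Int :=
  let turn_cnt := s.2 + 1
  if PySem.Int.mod turn_cnt 2 == 1 then
    if !(s.1.contains element) then (s.1.insert element 1, turn_cnt)
    else (s.1.modify element 0 (· + 1), turn_cnt)
  else (s.1, turn_cnt)

def check_reptitive_conversation (data : List String) : Bool :=
  let st := data.foldl aStep (PySem.Dict.empty, 0)
  -- second loop: return True on the first key whose count exceeds 1, else False
  st.1.keys.any (fun key => decide (st.1.getD key 0 > 1))

-- ===== PORT B =====
-- odds = sorted(x for i, x in enumerate(data) if i % 2 == 0)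
-- return any(a == b for a, b in zip(odds, odds[1:]))
def check_reptitive_conversation_alt (data : List String) : Bool :=
  let odds := PySem.List.sorted
      (((PySem.List.enumerate data 0).filter (fun p => PySem.Int.mod p.1 2 == 0)).map (·.2))
      (fun x => x) false
  (odds.zip (PySem.List.slice odds (some 1) none)).any (fun p => p.1 == p.2)

-- ===== PRECONDITION & SPEC =====
def Spec_check_reptitive_conversation (data : List String) (out : Bool) : Prop := out = check_reptitive_conversation_alt data
instance (data : List String) (out : Bool) : Decidable (Spec_check_reptitive_conversation data out) := by unfold Spec_check_reptitive_conversation; infer_instance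

-- ===== CLAIM (what is proved, stated in full; the proofs are below) =====
def Claim_equal_check_reptitive_conversation : Prop := ∀ (data : List String), Dom_check_reptitive_conversation data → Spec_check_reptitive_conversation data (check_reptitive_conversation data)

-- ===== LEMMAS AND PROOFS =====

-- the sublist of elements at "odd turns", given whether the current position is an odd turn
def oddsFrom : List String → Bool → List String
  | [], _ => []
  | x :: xs, b => if b then x :: oddsFrom xs (!b) else oddsFrom xs (!b)

lemma int_parity_flip (c : Int) :
    (PySem.Int.mod (c + 1 + 1) 2 == 1) = !(PySem.Int.mod (c + 1) 2 == 1) := by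
  simp only [PySem.Int.mod_eq_emod_of_pos (show (0:Int) < 2 by norm_num)]
  rcases Int.emod_two_eq (c + 1) with h | h <;>
    · rw [Int.add_emod, h]; simp

lemma int_parity_flip0 (c : Int) :
    (PySem.Int.mod (c + 1) 2 == 0) = !(PySem.Int.mod c 2 == 0) := by
  simp only [PySem.Int.mod_eq_emod_of_pos (show (0:Int) < 2 by norm_num)]
  rcases Int.emod_two_eq c with h | h <;>
    · rw [Int.add_emod, h]; simp

-- A's dict-building branch on an absent key is the same counting update
lemma insert_one_eq_modify (d : PySem.Dict String Int) (x : String) (h : d.contains x = false) :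
    d.insert x 1 = d.modify x 0 (· + 1) := by
  have hg : d.getD x 0 = 0 := PySem.Dict.getD_of_not_contains d 0 h
  simp [PySem.Dict.modify, PySem.Dict.insert, hg]

-- A's loop builds exactly the counter of the odd-turn elements
lemma aFold_fst (xs : List String) : ∀ (q : PySem.Dict String Int) (c : Int),
    (xs.foldl aStep (q, c)).1
      = (oddsFrom xs (PySem.Int.mod (c + 1) 2 == 1)).foldl (fun d x => d.modify x 0 (· + 1)) q := by
  induction xs with
  | nil => intro q c; simp [oddsFrom]
  | cons x xs ih =>
    intro q c
    by_cases hb : (PySem.Int.mod (c + 1) 2 == 1) = true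
    · by_cases hc : q.contains x = true
      · simp only [List.foldl_cons, aStep, hb, if_true, hc, Bool.not_true, Bool.false_eq_true,
          if_false, oddsFrom]
        rw [ih, int_parity_flip, hb]
        simp
      · simp only [Bool.not_eq_true] at hc
        simp only [List.foldl_cons, aStep, hb, if_true, hc, Bool.not_false, oddsFrom]
        rw [ih, insert_one_eq_modify q x hc, int_parity_flip, hb]
    · simp only [Bool.not_eq_true] at hb
      simp only [List.foldl_cons, aStep, hb, Bool.false_eq_true, if_false, oddsFrom]
      rw [ih, int_parity_flip, hb]

-- scanning the counter for a count > 1 is exactly "not Nodup"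
lemma any_count_eq (l : List String) :
    (PySem.Set.ofList l).any (fun k => decide ((l.count k : Int) > 1)) = !decide l.Nodup := by
  rw [Bool.eq_iff_iff]
  simp only [List.any_eq_true, PySem.Set.mem_ofList, decide_eq_true_eq, Bool.not_eq_true',
    decide_eq_false_iff_not]
  constructor
  · rintro ⟨k, hk, hgt⟩ hn
    have := List.nodup_iff_count_le_one.mp hn k
    omega
  · intro hn
    rw [List.nodup_iff_count_le_one] at hn
    push Not at hn
    obtain ⟨k, hk⟩ := hn
    exact ⟨k, List.count_pos_iff.mp (by omega), by exact_mod_cast hk⟩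

-- B's comprehension extracts exactly the odd-turn elements
lemma filter_enumerate_eq_oddsFrom (xs : List String) : ∀ (c : Int),
    ((PySem.List.enumerate xs c).filter (fun p => PySem.Int.mod p.1 2 == 0)).map (·.2)
      = oddsFrom xs (PySem.Int.mod c 2 == 0) := by
  induction xs with
  | nil => intro c; simp [PySem.List.enumerate_nil, oddsFrom]
  | cons x xs ih =>
    intro c
    rw [PySem.List.enumerate_cons]
    by_cases hb : (PySem.Int.mod c 2 == 0) = true
    · simp only [List.filter_cons, hb, if_true, List.map_cons, oddsFrom]
      rw [ih, int_parity_flip0, hb]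
    · simp only [Bool.not_eq_true] at hb
      simp only [List.filter_cons, hb, Bool.false_eq_true, if_false, oddsFrom]
      rw [ih, int_parity_flip0, hb]

-- on a ≤-sorted list, an equal adjacent pair exists exactly when the list is not Nodup
lemma adj_eq_of_pairwise_le (l : List String) (h : l.Pairwise (· ≤ ·)) :
    (l.zip l.tail).any (fun p => p.1 == p.2) = !decide l.Nodup := by
  induction l with
  | nil => simp
  | cons a t ih =>
    cases t with
    | nil => simp
    | cons b r =>
      have h' : (b :: r).Pairwise (· ≤ ·) := h.tail
      by_cases hab : a = b
      · subst hab
        simp [List.zip_cons_cons, List.nodup_cons]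
      · have hne : (a == b) = false := by simp [hab]
        have hmem : a ∉ b :: r := by
          intro hm
          rcases List.mem_cons.mp hm with h1 | h2
          · exact hab h1
          · have hab' : a ≤ b := (List.pairwise_cons.mp h).1 b List.mem_cons_self
            have hba : b ≤ a := by
              have := (List.pairwise_cons.mp h').1 a h2
              exact this
            exact hab (le_antisymm hab' hba)
        simp only [List.tail_cons, List.zip_cons_cons, List.any_cons, hne, Bool.false_or]
        have ihr := ih h'
        simp only [List.tail_cons] at ihr
        rw [ihr]
        simp [List.nodup_cons, hmem]

-- ===== VERDICT (by name: the statement is the Claim_ definition above) =====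
theorem check_reptitive_conversation_spec : Claim_equal_check_reptitive_conversation := by
  intro data _
  unfold Spec_check_reptitive_conversation check_reptitive_conversation check_reptitive_conversation_alt
  -- A's side: the counter of the odd-turn elements, then the count > 1 scan
  have hA := aFold_fst data PySem.Dict.empty 0
  simp only [show (PySem.Int.mod (0 + 1) 2 == 1) = true from rfl] at hA
  simp only [hA]
  rw [show ((oddsFrom data true).foldl (fun d x => d.modify x 0 (· + 1)) PySem.Dict.empty)
      = PySem.Dict.counter (oddsFrom data true) from rfl]
  rw [PySem.Dict.keys_counter]
  have hAval : (PySem.Set.ofList (oddsFrom data true)).any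
        (fun key => decide ((PySem.Dict.counter (oddsFrom data true)).getD key 0 > 1))
      = !decide (oddsFrom data true).Nodup := by
    calc (PySem.Set.ofList (oddsFrom data true)).any
          (fun key => decide ((PySem.Dict.counter (oddsFrom data true)).getD key 0 > 1))
        = (PySem.Set.ofList (oddsFrom data true)).any
          (fun key => decide (((oddsFrom data true).count key : Int) > 1)) := by
          apply PySem.List.any_congr_mem; intro k _; rw [PySem.Dict.getD_counter]
      _ = !decide (oddsFrom data true).Nodup := any_count_eq _
  rw [hAval]
  -- B's side: sorted odd-turn elements, adjacent-pair scan
  rw [filter_enumerate_eq_oddsFrom data 0]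
  simp only [show (PySem.Int.mod 0 2 == 0) = true from rfl]
  rw [PySem.List.slice_from_one]
  have hsorted : (PySem.List.sorted (oddsFrom data true) (fun x => x) false).Pairwise (· ≤ ·) :=
    PySem.List.sorted_pairwise (oddsFrom data true) (fun x => x)
  rw [adj_eq_of_pairwise_le _ hsorted]
  have hperm : (PySem.List.sorted (oddsFrom data true) (fun x => x) false).Perm (oddsFrom data true) :=
    PySem.List.sorted_perm _ _ _
  simp [hperm.nodup_iff]
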